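-- pv_equiv track=rewrite | github.com/paunchygent/skriptoteket | src/skriptoteket/script_bank/scripts/gruppgenerator.py | _score_groups
-- ===== SOURCE A (Python) =====
-- def _normalize_name(value: str) -> str:
--     return " ".join(value.strip().split())
--
-- def _dedupe_names(names: list[str]) -> list[str]:
--     seen: set[str] = set()
--     result: list[str] = []
--     for name in names:
--         cleaned = _normalize_name(name)
--         if not cleaned:
--             continue
--         key = cleaned.casefold()
--         if key in seen:
--             continue
--         seen.add(key)
--         result.append(cleaned)
--     return result
--
-- def _score_groups(groups: list[list[str]], previous_pairs: set[tuple[str, str]]) -> int: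
--     if not previous_pairs:
--         return 0
--     score = 0
--     for group in groups:
--         cleaned = _dedupe_names(group)
--         for idx, name in enumerate(cleaned):
--             for other in cleaned[idx + 1 :]:
--                 a, b = sorted((name.casefold(), other.casefold()))
--                 if (a, b) in previous_pairs:
--                     score += 1
--     return score
-- ===== SOURCE B (Python) =====
-- def _normalize_name(value: str) -> str:
--     return " ".join(value.strip().split())
--
--
-- def _score_groups(groups: list[list[str]], previous_pairs: set[tuple[str, str]]) -> int:
--     if not previous_pairs:
--         return 0
--     score = 0
--     for group in groups:
--         keys = set()
--         for name in group:
--             cleaned = _normalize_name(name)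
--             if cleaned:
--                 keys.add(cleaned.casefold())
--         for a, b in previous_pairs:
--             if a < b and a in keys and b in keys:
--                 score += 1
--     return score
-- ===== Notes on version B (the rewrite author's own statement) =====
-- stated objective: faster
-- what changed: B drops the quadratic generation of all internal pairs (enumerate + slice + per-pair sort): per group it builds one set of casefolded cleaned names and scans previous_pairs once, counting pairs (a, b) with a < b whose two members are both in that set; per-group cost falls from O(|group|^2) pair constructions to O(|group| + |previous_pairs|).
import Mathlib
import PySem

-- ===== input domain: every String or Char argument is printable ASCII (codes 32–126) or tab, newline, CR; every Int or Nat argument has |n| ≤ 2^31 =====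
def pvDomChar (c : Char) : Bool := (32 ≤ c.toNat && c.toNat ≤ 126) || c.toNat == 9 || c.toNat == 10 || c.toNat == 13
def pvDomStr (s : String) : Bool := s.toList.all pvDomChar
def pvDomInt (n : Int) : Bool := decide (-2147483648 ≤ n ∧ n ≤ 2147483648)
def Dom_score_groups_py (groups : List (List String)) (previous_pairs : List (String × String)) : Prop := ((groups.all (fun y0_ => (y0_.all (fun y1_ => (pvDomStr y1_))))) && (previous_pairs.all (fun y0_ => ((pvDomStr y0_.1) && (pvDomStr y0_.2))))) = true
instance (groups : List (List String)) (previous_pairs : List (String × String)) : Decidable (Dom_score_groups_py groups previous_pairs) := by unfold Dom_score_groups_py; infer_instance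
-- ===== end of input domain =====

-- B replaces A's quadratic per-group generation of all internal pairs by one membership set per group and a
-- single scan of previous_pairs (objective: faster; measured faster in a timing run). str.casefold is ported as
-- PySem.Str.lower (exact on the ASCII domain Dom_score_groups_py).

-- ===== PORT A =====
def pvNormalizeName (value : String) : String :=
  PySem.Str.join " " (PySem.Str.split₀ (PySem.Str.strip value))

def pvDedupeNames (names : List String) : List String :=
  (names.foldl (fun (st : PySem.Set String × List String) name =>
      let cleaned := pvNormalizeName name
      if cleaned = "" then st
      else
        let key := PySem.Str.lower cleaned
        if key ∈ st.1 then st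
        else (PySem.Set.add st.1 key, st.2 ++ [cleaned]))
    (PySem.Set.empty, [])).2

def score_groups_py (groups : List (List String)) (previous_pairs : List (String × String)) : Int :=
  if previous_pairs = [] then 0
  else
    groups.foldl (fun score group =>
      let cleaned := pvDedupeNames group
      (PySem.List.enumerate cleaned).foldl (fun score p =>
        (PySem.List.slice cleaned (some (p.1 + 1)) none).foldl (fun score other =>
          -- a, b = sorted((name.casefold(), other.casefold()))  (stable two-element sort)
          if (if PySem.Str.lower other < PySem.Str.lower p.2 then
                (PySem.Str.lower other, PySem.Str.lower p.2)
              else (PySem.Str.lower p.2, PySem.Str.lower other)) ∈ previous_pairs then score + 1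
          else score) score) score) 0

-- ===== PORT B =====
def score_groups_py_alt (groups : List (List String)) (previous_pairs : List (String × String)) : Int :=
  if previous_pairs = [] then 0
  else
    groups.foldl (fun score group =>
      let keys : PySem.Set String := group.foldl (fun ks name =>
        let cleaned := pvNormalizeName name
        if cleaned = "" then ks else PySem.Set.add ks (PySem.Str.lower cleaned)) PySem.Set.empty
      previous_pairs.foldl (fun score ab =>
        if ab.1 < ab.2 ∧ ab.1 ∈ keys ∧ ab.2 ∈ keys then score + 1 else score) score) 0

-- ===== PRECONDITION & SPEC =====
-- previous_pairs is a Python set: its List encoding holds distinct elements; Pre_ states exactly that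
-- (a list with duplicate pairs does not encode any Python input of A).
def Pre_score_groups_py (groups : List (List String)) (previous_pairs : List (String × String)) : Prop :=
  previous_pairs.Nodup
instance (groups : List (List String)) (previous_pairs : List (String × String)) : Decidable (Pre_score_groups_py groups previous_pairs) := by unfold Pre_score_groups_py; infer_instance

def pvWitness_score_groups_py : List (List String) × (List (String × String)) :=
  ([["Alice", " bob "], ["ALICE", "Cara"]], [("alice", "bob"), ("alice", "cara")])

def Spec_score_groups_py (groups : List (List String)) (previous_pairs : List (String × String)) (out : Int) : Prop := out = score_groups_py_alt groups previous_pairs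
instance (groups : List (List String)) (previous_pairs : List (String × String)) (out : Int) : Decidable (Spec_score_groups_py groups previous_pairs out) := by unfold Spec_score_groups_py; infer_instance

-- ===== CLAIM (what is proved, stated in full; the proofs are below) =====
def Claim_equal_score_groups_py : Prop := ∀ (groups : List (List String)) (previous_pairs : List (String × String)), Dom_score_groups_py groups previous_pairs → Pre_score_groups_py groups previous_pairs → Spec_score_groups_py groups previous_pairs (score_groups_py groups previous_pairs)

-- ===== LEMMAS AND PROOFS =====

-- the sorted casefold pair A queries for two deduped names
def pvSp (a b : String) : String × String := if b < a then (b, a) else (a, b)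

-- all pairs A's nested loops query on a deduped (lowered) list, one per unordered index pair
def pvPairs : List String → List (String × String)
  | [] => []
  | a :: ks => ks.map (pvSp a) ++ pvPairs ks

theorem pvPairs_components {K : List String} {q : String × String} (h : q ∈ pvPairs K) :
    q.1 ∈ K ∧ q.2 ∈ K := by
  induction K with
  | nil => simp [pvPairs] at h
  | cons a ks ih =>
    simp only [pvPairs, List.mem_append, List.mem_map] at h
    rcases h with ⟨b, hb, rfl⟩ | h
    · unfold pvSp; split_ifs <;> simp [hb]
    · exact ⟨List.mem_cons_of_mem _ (ih h).1, List.mem_cons_of_mem _ (ih h).2⟩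

theorem pvSp_inj {a b b' : String} (hb : b ≠ a) (hb' : b' ≠ a) (h : pvSp a b = pvSp a b') :
    b = b' := by
  unfold pvSp at h
  split_ifs at h <;> simp_all [Prod.ext_iff]

theorem pvPairs_nodup {K : List String} (h : K.Nodup) : (pvPairs K).Nodup := by
  induction K with
  | nil => simp [pvPairs]
  | cons a ks ih =>
    rcases List.nodup_cons.mp h with ⟨ha, hks⟩
    refine List.Nodup.append ?_ (ih hks) ?_
    · exact List.Nodup.map_on
        (fun b hb b' hb' => pvSp_inj (fun e => ha (e ▸ hb)) (fun e => ha (e ▸ hb'))) hks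
    · intro q hq hq'
      rcases List.mem_map.mp hq with ⟨b, hb, rfl⟩
      have hcomp := pvPairs_components hq'
      unfold pvSp at hcomp
      split_ifs at hcomp <;> exact ha (by tauto)

theorem mem_pvPairs {K : List String} (hK : K.Nodup) (q : String × String) :
    q ∈ pvPairs K ↔ q.1 < q.2 ∧ q.1 ∈ K ∧ q.2 ∈ K := by
  induction K with
  | nil => simp [pvPairs]
  | cons a ks ih =>
    rcases List.nodup_cons.mp hK with ⟨ha, hks⟩
    constructor
    · intro h
      simp only [pvPairs, List.mem_append, List.mem_map] at h
      rcases h with ⟨b, hb, rfl⟩ | h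
      · have hne : a ≠ b := fun e => ha (e ▸ hb)
        unfold pvSp; split_ifs with hlt
        · exact ⟨hlt, by simp [hb], by simp⟩
        · have : a < b := lt_of_le_of_ne (not_lt.mp hlt) hne
          exact ⟨this, by simp, by simp [hb]⟩
      · obtain ⟨h1, h2, h3⟩ := (ih hks).mp h
        exact ⟨h1, List.mem_cons_of_mem _ h2, List.mem_cons_of_mem _ h3⟩
    · rintro ⟨hlt, h1, h2⟩
      rcases List.mem_cons.mp h1 with e1 | h1'
      · rcases List.mem_cons.mp h2 with e2 | h2'
        · exact absurd hlt (by rw [e1, e2]; exact lt_irrefl _)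
        · refine List.mem_append.mpr (Or.inl (List.mem_map.mpr ⟨q.2, h2', ?_⟩))
          rw [← e1]; unfold pvSp; rw [if_neg (not_lt.mpr hlt.le), Prod.mk.eta]
      · rcases List.mem_cons.mp h2 with e2 | h2'
        · refine List.mem_append.mpr (Or.inl (List.mem_map.mpr ⟨q.1, h1', ?_⟩))
          rw [← e2]; unfold pvSp; rw [if_pos hlt, Prod.mk.eta]
        · exact List.mem_append.mpr (Or.inr ((ih hks).mpr ⟨hlt, h1', h2'⟩))

-- the central count: A's queried pairs found in P are exactly P's members internal to K
theorem pvCount_eq {K : List String} {P : List (String × String)} (hK : K.Nodup) (hP : P.Nodup) :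
    (pvPairs K).countP (fun q => decide (q ∈ P)) =
      P.countP (fun q => decide (q.1 < q.2 ∧ q.1 ∈ K ∧ q.2 ∈ K)) := by
  rw [List.countP_eq_length_filter, List.countP_eq_length_filter]
  refine List.Perm.length_eq ?_
  rw [List.perm_ext_iff_of_nodup (List.Nodup.filter _ (pvPairs_nodup hK)) (List.Nodup.filter _ hP)]
  intro q
  simp only [List.mem_filter, decide_eq_true_eq, mem_pvPairs hK]
  tauto

-- A's inner two loops, started at a suffix of cleaned, add the count of that suffix's queried pairs in P
theorem pvLoopA (P : List (String × String)) (cleaned : List String) :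
    ∀ (suffix : List String) (k : Nat) (s : Int), cleaned.drop k = suffix →
    (PySem.List.enumerate suffix (k : Int)).foldl (fun score p =>
        (PySem.List.slice cleaned (some (p.1 + 1)) none).foldl (fun score other =>
          if (if PySem.Str.lower other < PySem.Str.lower p.2 then
                (PySem.Str.lower other, PySem.Str.lower p.2)
              else (PySem.Str.lower p.2, PySem.Str.lower other)) ∈ P then score + 1
          else score) score) s
      = s + ((pvPairs (suffix.map PySem.Str.lower)).countP (fun q => decide (q ∈ P)) : Int) := by
  intro suffix
  induction suffix with
  | nil => intro k s h; simp [PySem.List.enumerate, pvPairs]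
  | cons x rest ih =>
    intro k s h
    have hdrop : cleaned.drop (k + 1) = rest := by
      rw [← List.drop_drop, h]; simp
    have hcast : (k : Int) + 1 = ((k + 1 : Nat) : Int) := by push_cast; ring
    simp only [PySem.List.enumerate, List.foldl_cons]
    rw [hcast, PySem.List.slice_from_natCast, hdrop,
      PySem.List.foldl_ite_add_one (fun other =>
        (if PySem.Str.lower other < PySem.Str.lower x then
            (PySem.Str.lower other, PySem.Str.lower x)
          else (PySem.Str.lower x, PySem.Str.lower other)) ∈ P) rest s,
      ih (k + 1) _ hdrop]
    simp only [pvPairs, List.map_cons, List.countP_append, List.countP_map, Function.comp_def, pvSp]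
    push_cast
    exact add_assoc s _ _

-- B's key-building loop computes the seen-set of A's dedupe loop, which is the lowered dedupe result
theorem pvDedupeInv (names : List String) :
    ∀ (s : PySem.Set String) (r : List String), s = r.map PySem.Str.lower → s.Nodup →
      (names.foldl (fun ks name =>
          if pvNormalizeName name = "" then ks
          else PySem.Set.add ks (PySem.Str.lower (pvNormalizeName name))) s
        = (names.foldl (fun (st : PySem.Set String × List String) name =>
            if pvNormalizeName name = "" then st
            else if PySem.Str.lower (pvNormalizeName name) ∈ st.1 then st
            else (PySem.Set.add st.1 (PySem.Str.lower (pvNormalizeName name)),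
                  st.2 ++ [pvNormalizeName name])) (s, r)).1)
      ∧ (names.foldl (fun (st : PySem.Set String × List String) name =>
            if pvNormalizeName name = "" then st
            else if PySem.Str.lower (pvNormalizeName name) ∈ st.1 then st
            else (PySem.Set.add st.1 (PySem.Str.lower (pvNormalizeName name)),
                  st.2 ++ [pvNormalizeName name])) (s, r)).1
          = ((names.foldl (fun (st : PySem.Set String × List String) name =>
            if pvNormalizeName name = "" then st
            else if PySem.Str.lower (pvNormalizeName name) ∈ st.1 then st
            else (PySem.Set.add st.1 (PySem.Str.lower (pvNormalizeName name)),
                  st.2 ++ [pvNormalizeName name])) (s, r)).2).map PySem.Str.lower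
      ∧ ((names.foldl (fun (st : PySem.Set String × List String) name =>
            if pvNormalizeName name = "" then st
            else if PySem.Str.lower (pvNormalizeName name) ∈ st.1 then st
            else (PySem.Set.add st.1 (PySem.Str.lower (pvNormalizeName name)),
                  st.2 ++ [pvNormalizeName name])) (s, r)).1).Nodup := by
  induction names with
  | nil => intro s r hs hnd; exact ⟨rfl, by simpa using hs, hnd⟩
  | cons name rest ih =>
    intro s r hs hnd
    simp only [List.foldl_cons]
    by_cases hc : pvNormalizeName name = ""
    · simp only [if_pos hc]
      exact ih s r hs hnd
    · simp only [if_neg hc]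
      by_cases hk : PySem.Str.lower (pvNormalizeName name) ∈ s
      · simp only [if_pos hk, PySem.Set.add_of_mem hk]
        exact ih s r hs hnd
      · simp only [if_neg hk, PySem.Set.add_of_not_mem hk]
        refine ih (s ++ [PySem.Str.lower (pvNormalizeName name)]) (r ++ [pvNormalizeName name])
          ?_ ?_
        · rw [List.map_append, ← hs]; rfl
        · simp [List.nodup_append, hnd]
          exact fun a ha e => hk (e ▸ ha)

-- A's inner loops from the start of cleaned
theorem pvLoopA0 (P : List (String × String)) (cleaned : List String) (s : Int) :
    (PySem.List.enumerate cleaned).foldl (fun score p =>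
        (PySem.List.slice cleaned (some (p.1 + 1)) none).foldl (fun score other =>
          if (if PySem.Str.lower other < PySem.Str.lower p.2 then
                (PySem.Str.lower other, PySem.Str.lower p.2)
              else (PySem.Str.lower p.2, PySem.Str.lower other)) ∈ P then score + 1
          else score) score) s
      = s + ((pvPairs (cleaned.map PySem.Str.lower)).countP (fun q => decide (q ∈ P)) : Int) := by
  have h := pvLoopA P cleaned cleaned 0 s rfl
  simpa using h

-- the two outer loops over groups agree
theorem pvOuter (P : List (String × String)) (hP : P.Nodup) :
    ∀ (gs : List (List String)) (sc : Int),
    gs.foldl (fun score group =>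
      (PySem.List.enumerate (pvDedupeNames group)).foldl (fun score p =>
        (PySem.List.slice (pvDedupeNames group) (some (p.1 + 1)) none).foldl (fun score other =>
          if (if PySem.Str.lower other < PySem.Str.lower p.2 then
                (PySem.Str.lower other, PySem.Str.lower p.2)
              else (PySem.Str.lower p.2, PySem.Str.lower other)) ∈ P then score + 1
          else score) score) score) sc
    = gs.foldl (fun score group =>
        P.foldl (fun score ab =>
          if ab.1 < ab.2 ∧
              ab.1 ∈ group.foldl (fun ks name =>
                if pvNormalizeName name = "" then ks
                else PySem.Set.add ks (PySem.Str.lower (pvNormalizeName name))) PySem.Set.empty ∧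
              ab.2 ∈ group.foldl (fun ks name =>
                if pvNormalizeName name = "" then ks
                else PySem.Set.add ks (PySem.Str.lower (pvNormalizeName name))) PySem.Set.empty
            then score + 1 else score) score) sc := by
  intro gs
  induction gs with
  | nil => intro sc; rfl
  | cons g gs ih =>
    intro sc
    obtain ⟨hB, hmap, hnd⟩ := pvDedupeInv g PySem.Set.empty [] rfl List.nodup_nil
    simp only [List.foldl_cons]
    rw [pvLoopA0, hB,
      PySem.List.foldl_ite_add_one (fun ab : String × String =>
        ab.1 < ab.2 ∧
          ab.1 ∈ (g.foldl (fun (st : PySem.Set String × List String) name =>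
            if pvNormalizeName name = "" then st
            else if PySem.Str.lower (pvNormalizeName name) ∈ st.1 then st
            else (PySem.Set.add st.1 (PySem.Str.lower (pvNormalizeName name)),
                  st.2 ++ [pvNormalizeName name])) (PySem.Set.empty, [])).1 ∧
          ab.2 ∈ (g.foldl (fun (st : PySem.Set String × List String) name =>
            if pvNormalizeName name = "" then st
            else if PySem.Str.lower (pvNormalizeName name) ∈ st.1 then st
            else (PySem.Set.add st.1 (PySem.Str.lower (pvNormalizeName name)),
                  st.2 ++ [pvNormalizeName name])) (PySem.Set.empty, [])).1) P sc]
    have hcl : (pvDedupeNames g).map PySem.Str.lower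
        = (g.foldl (fun (st : PySem.Set String × List String) name =>
            if pvNormalizeName name = "" then st
            else if PySem.Str.lower (pvNormalizeName name) ∈ st.1 then st
            else (PySem.Set.add st.1 (PySem.Str.lower (pvNormalizeName name)),
                  st.2 ++ [pvNormalizeName name])) (PySem.Set.empty, [])).1 := hmap.symm
    rw [hcl, pvCount_eq hnd hP]
    exact ih _

-- ===== VERDICT (by name: the statement is the Claim_ definition above) =====
theorem score_groups_py_spec : Claim_equal_score_groups_py := by
  intro groups P _hDom hPre
  unfold Spec_score_groups_py score_groups_py score_groups_py_alt
  by_cases hP : P = []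
  · rw [if_pos hP, if_pos hP]
  · rw [if_neg hP, if_neg hP]
    exact pvOuter P hPre groups 0
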